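-- pv_equiv track=rewrite | github.com/monicrack/Python | strings/ejerciciosCompartidos.py | convertir_minusculas
-- ===== SOURCE A (Python) =====
-- def convertir_minusculas(cadena):
--    #1.convertir a minúsculas
--    cadena_minusculas=cadena.lower()
--    # 2. Eliminar espacios
--    cadena_sin_espacios = cadena_minusculas.replace(" ", "")
--    # 3. Recorrer la cadena y sustituir letras en posiciones pares
--    resultado = ""
--    for i, caracter in enumerate(cadena_sin_espacios):
--        if i % 2 == 0:   # índice par = letra impar mantener la letra
--            resultado += caracter
--        else:            # índice impar = letra par sustituir por *
--            resultado += "*"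
--    return resultado
-- ===== SOURCE B (Python) =====
-- def convertir_minusculas(cadena):
--     cleaned = cadena.lower().replace(" ", "")
--     out = []
--     n = len(cleaned)
--     i = 0
--     while n - i >= 2:          # consume two characters per step: keep one, star the other
--         out.append(cleaned[i])
--         out.append("*")
--         i += 2
--     out.extend(cleaned[i:])    # at most one leftover character
--     return "".join(out)
-- ===== Notes on version B (the rewrite author's own statement) =====
-- stated objective: alternative
-- what changed: Replaces the indexed enumerate loop with a parity branch by a loop that consumes the cleaned string two characters per step, emitting the kept character plus a star, with the at-most-one leftover character appended at the end; output is assembled with a list and one join instead of repeated string concatenation.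
import Mathlib
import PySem

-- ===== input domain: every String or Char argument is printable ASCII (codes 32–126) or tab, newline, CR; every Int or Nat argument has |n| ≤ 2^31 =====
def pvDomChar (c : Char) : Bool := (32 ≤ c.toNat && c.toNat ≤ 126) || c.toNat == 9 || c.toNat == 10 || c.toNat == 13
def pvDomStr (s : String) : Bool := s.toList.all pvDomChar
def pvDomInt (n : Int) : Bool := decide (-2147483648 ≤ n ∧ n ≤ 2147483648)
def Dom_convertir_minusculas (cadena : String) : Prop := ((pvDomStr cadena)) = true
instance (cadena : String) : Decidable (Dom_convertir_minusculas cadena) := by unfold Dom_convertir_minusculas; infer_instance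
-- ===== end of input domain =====

-- B consumes the cleaned string two characters per step (keep one, star one) instead of an indexed loop with a parity branch.
-- ===== PORT A =====
def convertir_minusculas (cadena : String) : String :=
  let cadena_minusculas := PySem.Str.lower cadena
  let cadena_sin_espacios := PySem.Str.replace cadena_minusculas " " ""
  let resultado := (PySem.List.enumerate cadena_sin_espacios.toList 0).foldl
      (fun acc p => acc ++ [if PySem.Int.mod p.1 2 == 0 then p.2 else '*']) ([] : List Char)
  String.ofList resultado

-- ===== PORT B =====
-- the while loop "while n - i >= 2: keep cleaned[i], emit '*', i += 2; then the ≤1 leftover" rendered as two-at-a-time list consumption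
def pvGo : List Char → List Char
  | [] => []
  | [c] => [c]
  | c :: _ :: rest => c :: '*' :: pvGo rest

def convertir_minusculas_alt (cadena : String) : String :=
  let cleaned := PySem.Str.replace (PySem.Str.lower cadena) " " ""
  String.ofList (pvGo cleaned.toList)

-- ===== PRECONDITION & SPEC =====
def Spec_convertir_minusculas (cadena : String) (out : String) : Prop := out = convertir_minusculas_alt cadena
instance (cadena : String) (out : String) : Decidable (Spec_convertir_minusculas cadena out) := by unfold Spec_convertir_minusculas; infer_instance

-- ===== CLAIM (what is proved, stated in full; the proofs are below) =====
def Claim_equal_convertir_minusculas : Prop := ∀ (cadena : String), Dom_convertir_minusculas cadena → Spec_convertir_minusculas cadena (convertir_minusculas cadena)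

-- ===== LEMMAS AND PROOFS =====
theorem pv_loopA (l : List Char) : ∀ (k : Int) (acc : List Char),
    (PySem.List.enumerate l (2 * k)).foldl
        (fun acc p => acc ++ [if PySem.Int.mod p.1 2 == 0 then p.2 else '*']) acc
      = acc ++ pvGo l := by
  induction l using pvGo.induct with
  | case1 => intro k acc; simp [PySem.List.enumerate_nil, pvGo]
  | case2 c =>
    intro k acc
    simp [PySem.List.enumerate_cons, PySem.List.enumerate_nil, pvGo]
  | case3 c d rest ih =>
    intro k acc
    have h0 : PySem.Int.mod (2 * k) 2 = 0 := by
      rw [PySem.Int.mod_eq_emod_of_pos] <;> omega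
    have h1 : PySem.Int.mod (2 * k + 1) 2 = 1 := by
      rw [PySem.Int.mod_eq_emod_of_pos] <;> omega
    have hk : 2 * k + 1 + 1 = 2 * (k + 1) := by ring
    simp only [PySem.List.enumerate_cons, List.foldl_cons, h0, h1, hk]
    rw [ih (k + 1) (acc ++ [if (0 : Int) == 0 then c else '*'] ++ [if (1 : Int) == 0 then d else '*'])]
    simp [pvGo]

-- ===== VERDICT (by name: the statement is the Claim_ definition above) =====
theorem convertir_minusculas_spec : Claim_equal_convertir_minusculas := by
  intro cadena _
  unfold Spec_convertir_minusculas convertir_minusculas convertir_minusculas_alt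
  have h := pv_loopA (PySem.Str.replace (PySem.Str.lower cadena) " " "").toList 0 []
  simp only [Int.mul_zero, List.nil_append] at h
  simpa using congrArg String.ofList h
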